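-- pv_equiv track=rewrite | github.com/Mohanty-Hitesh-4495/Python-Mastery-Camp | timer.py | generate_neighbor_sum_matrix
-- ===== SOURCE A (Python) =====
-- def generate_neighbor_sum_matrix(matrix):
--     rows = len(matrix)
--     cols = len(matrix[0])
--     neighbor_sum_matrix = [[0] * cols for _ in range(rows)]
--
--     for i in range(rows):
--         for j in range(cols):
--             # Iterate over each neighbor of the current element (i, j)
--             for x in range(i - 1, i + 2):
--                 for y in range(j - 1, j + 2):
--                     # Check if the neighbor indices are within bounds
--                     if 0 <= x < rows and 0 <= y < cols:
--                         # Exclude the current element itself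
--                         if (x, y) != (i, j):
--                             neighbor_sum_matrix[i][j] += matrix[x][y]
--
--     return neighbor_sum_matrix
-- ===== SOURCE B (Python) =====
-- def generate_neighbor_sum_matrix(matrix):
--     rows = len(matrix)
--     cols = len(matrix[0])
--     # 2D prefix-sum table P of size (rows+1) x (cols+1): P[i][j] = sum of matrix[x][y] for x<i, y<j
--     P = [[0] * (cols + 1)]
--     for i in range(rows):
--         prev = P[i]
--         cur = [0]
--         for j in range(cols):
--             cur.append(matrix[i][j] + prev[j + 1] + cur[j] - prev[j])
--         P.append(cur)
--     result = []
--     for i in range(rows):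
--         r0 = i - 1 if i > 0 else 0
--         r1 = min(rows - 1, i + 1)
--         row_out = []
--         for j in range(cols):
--             c0 = j - 1 if j > 0 else 0
--             c1 = min(cols - 1, j + 1)
--             row_out.append(P[r1 + 1][c1 + 1] - P[r0][c1 + 1] - P[r1 + 1][c0] + P[r0][c0]
--                            - matrix[i][j])
--         result.append(row_out)
--     return result
-- ===== Notes on version B (the rewrite author's own statement) =====
-- stated objective: faster
-- what changed: A sums the 3x3 neighborhood per cell with eight per-neighbor bounds-checked index loops; B builds a 2D prefix-sum table once and answers each cell by inclusion-exclusion over the clamped window, subtracting the center.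
import Mathlib
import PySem

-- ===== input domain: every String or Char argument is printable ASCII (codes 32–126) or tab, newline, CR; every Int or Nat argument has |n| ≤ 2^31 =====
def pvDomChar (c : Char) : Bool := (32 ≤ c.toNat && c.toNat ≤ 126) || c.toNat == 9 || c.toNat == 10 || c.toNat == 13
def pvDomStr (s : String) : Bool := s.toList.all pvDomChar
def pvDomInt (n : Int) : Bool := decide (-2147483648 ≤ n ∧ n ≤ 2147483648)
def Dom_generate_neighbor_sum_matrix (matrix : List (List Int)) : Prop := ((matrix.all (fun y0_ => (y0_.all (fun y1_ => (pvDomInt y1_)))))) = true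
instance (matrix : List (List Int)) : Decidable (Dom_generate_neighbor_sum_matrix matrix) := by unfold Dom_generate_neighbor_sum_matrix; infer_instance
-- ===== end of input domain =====

-- B replaces A's per-cell 3x3 neighbor loops by a 2D prefix-sum table queried with
-- inclusion-exclusion over the clamped window, minus the center (objective: faster, constant-factor).

-- ===== PORT A =====
def generate_neighbor_sum_matrix (matrix : List (List Int)) : List (List Int) :=
  let rows : Int := matrix.length
  let cols : Int := ((PySem.List.pyGet? matrix 0).getD []).length
  (PySem.List.pyRange 0 rows 1).map (fun i =>
    (PySem.List.pyRange 0 cols 1).map (fun j =>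
      (PySem.List.pyRange (i - 1) (i + 2) 1).foldl (fun acc x =>
        (PySem.List.pyRange (j - 1) (j + 2) 1).foldl (fun acc2 y =>
          if 0 ≤ x ∧ x < rows ∧ 0 ≤ y ∧ y < cols ∧ ¬(x = i ∧ y = j)
          then acc2 + PySem.List.pyGetD (PySem.List.pyGetD matrix x []) y 0
          else acc2) acc) 0))

-- ===== PORT B =====
-- Loop indices are the nonnegative range(rows)/range(cols); Nat subtraction i-1
-- is Python's clamped `i - 1 if i > 0 else 0`.
def generate_neighbor_sum_matrix_alt (matrix : List (List Int)) : List (List Int) :=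
  let rows : Nat := matrix.length
  let cols : Nat := ((PySem.List.pyGet? matrix 0).getD []).length
  let P := (List.range rows).foldl
    (fun P i => P ++ [(List.range cols).foldl
      (fun cur j => cur ++ [(matrix.getD i []).getD j 0 + (P.getD i []).getD (j+1) 0
        + cur.getD j 0 - (P.getD i []).getD j 0]) [0]])
    [List.replicate (cols+1) 0]
  (List.range rows).foldl
    (fun result i =>
      result ++ [(List.range cols).foldl
        (fun rowOut j =>
          rowOut ++ [(P.getD (min (rows-1) (i+1) + 1) []).getD (min (cols-1) (j+1) + 1) 0
            - (P.getD (i-1) []).getD (min (cols-1) (j+1) + 1) 0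
            - (P.getD (min (rows-1) (i+1) + 1) []).getD (j-1) 0
            + (P.getD (i-1) []).getD (j-1) 0
            - (matrix.getD i []).getD j 0])
        []])
    []

-- ===== PRECONDITION & SPEC =====
-- Pre_ excludes exactly the inputs on which A raises IndexError: the empty matrix
-- (matrix[0]) and matrices with some row shorter than the first row (matrix[x][y]).
def Pre_generate_neighbor_sum_matrix (matrix : List (List Int)) : Prop :=
  matrix ≠ [] ∧ ∀ row ∈ matrix, (matrix.headD []).length ≤ row.length
instance (matrix : List (List Int)) : Decidable (Pre_generate_neighbor_sum_matrix matrix) := by unfold Pre_generate_neighbor_sum_matrix; infer_instance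

def pvWitness_generate_neighbor_sum_matrix : List (List Int) := [[1, 2], [3, 4], [5, 6]]

def Spec_generate_neighbor_sum_matrix (matrix : List (List Int)) (out : List (List Int)) : Prop := out = generate_neighbor_sum_matrix_alt matrix
instance (matrix : List (List Int)) (out : List (List Int)) : Decidable (Spec_generate_neighbor_sum_matrix matrix out) := by unfold Spec_generate_neighbor_sum_matrix; infer_instance

-- ===== CLAIM (what is proved, stated in full; the proofs are below) =====
def Claim_equal_generate_neighbor_sum_matrix : Prop := ∀ (matrix : List (List Int)), Dom_generate_neighbor_sum_matrix matrix → Pre_generate_neighbor_sum_matrix matrix → Spec_generate_neighbor_sum_matrix matrix (generate_neighbor_sum_matrix matrix)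

-- ===== LEMMAS AND PROOFS =====

-- raw matrix entry, guarded entry, prefix sums
def pvM (matrix : List (List Int)) (x y : Nat) : Int := (matrix.getD x []).getD y 0
def pvT (matrix : List (List Int)) (c : Nat) (x y : Int) : Int :=
  if 0 ≤ x ∧ x < (matrix.length : Int) ∧ 0 ≤ y ∧ y < (c : Int)
  then pvM matrix x.toNat y.toNat else 0
def pvF (matrix : List (List Int)) (i j : Nat) : Int :=
  ∑ x ∈ Finset.range i, ∑ y ∈ Finset.range j, pvM matrix x y
def pvProw (matrix : List (List Int)) (cols i : Nat) : List Int :=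
  (List.range (cols+1)).map (fun j => pvF matrix i j)
def pvG2 (f : Nat → Int) (prev : List Int) : Nat → Int
  | 0 => 0
  | j+1 => f j + prev.getD (j+1) 0 + pvG2 f prev j - prev.getD j 0

theorem pv_getD_map_range {β : Type} (g : Nat → β) (n k : Nat) (d : β) (h : k < n) :
    ((List.range n).map g).getD k d = g k := by
  simp [List.getD, h]

theorem pv_build (f : Nat → Int) (prev : List Int) (n : Nat) :
    (List.range n).foldl
      (fun cur j => cur ++ [f j + prev.getD (j+1) 0 + cur.getD j 0 - prev.getD j 0]) [0]
      = (List.range (n+1)).map (pvG2 f prev) := by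
  induction n with
  | zero => simp [pvG2]
  | succ n ih =>
      rw [List.range_succ, List.foldl_append, ih]
      simp only [List.foldl_cons, List.foldl_nil]
      rw [pv_getD_map_range _ _ _ _ (by omega)]
      rw [List.range_succ (n := n+1), List.map_append]
      rfl

theorem pv_G2F (matrix : List (List Int)) (cols i : Nat) (j : Nat) (hj : j ≤ cols) :
    pvG2 (fun y => (matrix.getD i []).getD y 0) (pvProw matrix cols i) j = pvF matrix (i+1) j := by
  induction j with
  | zero => simp [pvG2, pvF]
  | succ j ih =>
      have hj' : j ≤ cols := by omega
      have h1 : (pvProw matrix cols i).getD j 0 = pvF matrix i j := by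
        unfold pvProw; rw [pv_getD_map_range _ _ _ _ (by omega)]
      have h2 : (pvProw matrix cols i).getD (j+1) 0 = pvF matrix i (j+1) := by
        unfold pvProw; rw [pv_getD_map_range _ _ _ _ (by omega)]
      have h3 : pvF matrix (i+1) j = pvF matrix i j + ∑ y ∈ Finset.range j, pvM matrix i y :=
        Finset.sum_range_succ _ i
      have h4 : pvF matrix (i+1) (j+1) = pvF matrix i (j+1) + ∑ y ∈ Finset.range (j+1), pvM matrix i y :=
        Finset.sum_range_succ _ i
      have h5 : ∑ y ∈ Finset.range (j+1), pvM matrix i y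
          = (∑ y ∈ Finset.range j, pvM matrix i y) + pvM matrix i j :=
        Finset.sum_range_succ _ j
      simp only [pvG2, ih hj', h1, h2]
      rw [h4, h5, h3]
      show (matrix.getD i []).getD j 0 + _ + _ - _ = _
      have : pvM matrix i j = (matrix.getD i []).getD j 0 := rfl
      rw [← this]
      ring

theorem pv_P (matrix : List (List Int)) (cols k : Nat) :
    (List.range k).foldl
      (fun P i => P ++ [(List.range cols).foldl
        (fun cur j => cur ++ [(matrix.getD i []).getD j 0 + (P.getD i []).getD (j+1) 0
          + cur.getD j 0 - (P.getD i []).getD j 0]) [0]])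
      [List.replicate (cols+1) 0]
      = (List.range (k+1)).map (pvProw matrix cols) := by
  induction k with
  | zero =>
      simp only [List.range_zero, List.foldl_nil]
      congr 1
      unfold pvProw pvF
      simp
  | succ k ih =>
      rw [List.range_succ, List.foldl_append, ih]
      simp only [List.foldl_cons, List.foldl_nil]
      rw [pv_getD_map_range _ _ _ _ (by omega)]
      rw [pv_build]
      have : (List.range (cols+1)).map (pvG2 (fun y => (matrix.getD k []).getD y 0) (pvProw matrix cols k))
          = pvProw matrix cols (k+1) := by
        unfold pvProw
        apply List.map_congr_left
        intro j hj
        exact pv_G2F matrix cols k j (by simpa using Nat.lt_succ_iff.mp (List.mem_range.mp hj))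
      rw [this, List.range_succ (n := k+1), List.map_append]
      simp

theorem pv_ico1 (h : Nat → Int) (a : Nat) : ∑ x ∈ Finset.Ico a (a+1), h x = h a := by
  rw [Finset.sum_Ico_succ_top (by omega), Finset.Ico_self, Finset.sum_empty, zero_add]

theorem pv_ico2 (h : Nat → Int) (a : Nat) : ∑ x ∈ Finset.Ico a (a+2), h x = h a + h (a+1) := by
  rw [show a+2 = (a+1)+1 from rfl, Finset.sum_Ico_succ_top (by omega), pv_ico1]

theorem pv_ico3 (h : Nat → Int) (a : Nat) :
    ∑ x ∈ Finset.Ico a (a+3), h x = h a + h (a+1) + h (a+2) := by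
  rw [show a+3 = (a+2)+1 from rfl, Finset.sum_Ico_succ_top (by omega), pv_ico2]

theorem pv_Ico3 (h : Nat → Int) (n i : Nat) (hi : i < n) :
    ∑ x ∈ Finset.Ico (i-1) (min (n-1) (i+1) + 1), h x
      = (if 1 ≤ i then h (i-1) else 0) + h i + (if i+1 < n then h (i+1) else 0) := by
  rcases Nat.lt_or_ge i 1 with h0 | h1
  · have hi0 : i = 0 := by omega
    subst hi0
    rcases Nat.lt_or_ge 1 n with h2 | h2
    · rw [show (0:Nat)-1 = 0 from rfl, show min (n-1) (0+1) + 1 = 0+2 by omega, pv_ico2]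
      rw [if_neg (by omega), if_pos (by omega)]
      ring
    · have hn : n = 1 := by omega
      subst hn
      rw [show (0:Nat)-1 = 0 from rfl, show min (1-1) (0+1) + 1 = 0+1 by omega, pv_ico1]
      rw [if_neg (by omega), if_neg (by omega)]
      ring
  · rcases Nat.lt_or_ge (i+1) n with h2 | h2
    · rw [show min (n-1) (i+1) + 1 = (i-1)+3 by omega, pv_ico3,
          show (i-1)+1 = i by omega, show (i-1)+2 = i+1 by omega,
          if_pos h1, if_pos h2]
    · have hn : n = i+1 := by omega
      rw [show min (n-1) (i+1) + 1 = (i-1)+2 by omega, pv_ico2,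
          show (i-1)+1 = i by omega, if_pos h1, if_neg (by omega)]
      ring

theorem pv_window (matrix : List (List Int)) (a b c0 c1 : Nat) (hab : a ≤ b) (hc : c0 ≤ c1) :
    pvF matrix b c1 - pvF matrix a c1 - pvF matrix b c0 + pvF matrix a c0
      = ∑ x ∈ Finset.Ico a b, ∑ y ∈ Finset.Ico c0 c1, pvM matrix x y := by
  have h1 := Finset.sum_Ico_eq_sub (fun x => ∑ y ∈ Finset.range c1, pvM matrix x y) hab
  have h0 := Finset.sum_Ico_eq_sub (fun x => ∑ y ∈ Finset.range c0, pvM matrix x y) hab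
  have hrow : ∀ x, ∑ y ∈ Finset.Ico c0 c1, pvM matrix x y
      = (∑ y ∈ Finset.range c1, pvM matrix x y) - ∑ y ∈ Finset.range c0, pvM matrix x y :=
    fun x => Finset.sum_Ico_eq_sub _ hc
  rw [Finset.sum_congr rfl (fun x _ => hrow x), Finset.sum_sub_distrib, h1, h0]
  unfold pvF
  ring

-- per-cell equality: prefix-sum window minus center = the eight guarded neighbor terms
set_option maxHeartbeats 1000000 in
theorem pv_cellB (matrix : List (List Int)) (c i j : Nat)
    (hi : i < matrix.length) (hj : j < c) :
    pvF matrix (min (matrix.length-1) (i+1) + 1) (min (c-1) (j+1) + 1)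
      - pvF matrix (i-1) (min (c-1) (j+1) + 1)
      - pvF matrix (min (matrix.length-1) (i+1) + 1) (j-1)
      + pvF matrix (i-1) (j-1)
      - pvM matrix i j
      = pvT matrix c ((i:Int)-1) ((j:Int)-1) + pvT matrix c ((i:Int)-1) (j:Int)
        + pvT matrix c ((i:Int)-1) ((j:Int)+1) + pvT matrix c (i:Int) ((j:Int)-1)
        + pvT matrix c (i:Int) ((j:Int)+1) + pvT matrix c ((i:Int)+1) ((j:Int)-1)
        + pvT matrix c ((i:Int)+1) (j:Int) + pvT matrix c ((i:Int)+1) ((j:Int)+1) := by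
  have e1 : ((i:Int)-1).toNat = i-1 := by omega
  have e2 : ((i:Int)+1).toNat = i+1 := by omega
  have e3 : (i:Int).toNat = i := by omega
  have f1 : ((j:Int)-1).toNat = j-1 := by omega
  have f2 : ((j:Int)+1).toNat = j+1 := by omega
  have f3 : (j:Int).toNat = j := by omega
  rw [pv_window matrix (i-1) (min (matrix.length-1) (i+1) + 1) (j-1) (min (c-1) (j+1) + 1)
      (by omega) (by omega)]
  rw [pv_Ico3 _ matrix.length i hi]
  have hinner : ∀ x, ∑ y ∈ Finset.Ico (j-1) (min (c-1) (j+1) + 1), pvM matrix x y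
      = (if 1 ≤ j then pvM matrix x (j-1) else 0) + pvM matrix x j
        + (if j+1 < c then pvM matrix x (j+1) else 0) :=
    fun x => pv_Ico3 _ c j hj
  simp only [hinner]
  have T11 : pvT matrix c ((i:Int)-1) ((j:Int)-1)
      = if 1 ≤ i then (if 1 ≤ j then pvM matrix (i-1) (j-1) else 0) else 0 := by
    simp only [pvT, e1, f1]; split_ifs <;> first | rfl | (exfalso; omega)
  have T12 : pvT matrix c ((i:Int)-1) (j:Int)
      = if 1 ≤ i then pvM matrix (i-1) j else 0 := by
    simp only [pvT, e1, f3]; split_ifs <;> first | rfl | (exfalso; omega)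
  have T13 : pvT matrix c ((i:Int)-1) ((j:Int)+1)
      = if 1 ≤ i then (if j+1 < c then pvM matrix (i-1) (j+1) else 0) else 0 := by
    simp only [pvT, e1, f2]; split_ifs <;> first | rfl | (exfalso; omega)
  have T21 : pvT matrix c (i:Int) ((j:Int)-1)
      = if 1 ≤ j then pvM matrix i (j-1) else 0 := by
    simp only [pvT, e3, f1]; split_ifs <;> first | rfl | (exfalso; omega)
  have T23 : pvT matrix c (i:Int) ((j:Int)+1)
      = if j+1 < c then pvM matrix i (j+1) else 0 := by
    simp only [pvT, e3, f2]; split_ifs <;> first | rfl | (exfalso; omega)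
  have T31 : pvT matrix c ((i:Int)+1) ((j:Int)-1)
      = if i+1 < matrix.length then (if 1 ≤ j then pvM matrix (i+1) (j-1) else 0) else 0 := by
    simp only [pvT, e2, f1]; split_ifs <;> first | rfl | (exfalso; omega)
  have T32 : pvT matrix c ((i:Int)+1) (j:Int)
      = if i+1 < matrix.length then pvM matrix (i+1) j else 0 := by
    simp only [pvT, e2, f3]; split_ifs <;> first | rfl | (exfalso; omega)
  have T33 : pvT matrix c ((i:Int)+1) ((j:Int)+1)
      = if i+1 < matrix.length then (if j+1 < c then pvM matrix (i+1) (j+1) else 0) else 0 := by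
    simp only [pvT, e2, f2]; split_ifs <;> first | rfl | (exfalso; omega)
  rw [T11, T12, T13, T21, T23, T31, T32, T33]
  split_ifs <;> ring

-- A's guarded neighbor term
theorem pv_termA (matrix : List (List Int)) (c : Nat)
    (x y : Int) (P : Prop) [Decidable P] (hP : P) :
    (if 0 ≤ x ∧ x < (matrix.length : Int) ∧ 0 ≤ y ∧ y < (c : Int) ∧ P
     then PySem.List.pyGetD (PySem.List.pyGetD matrix x []) y 0 else 0)
      = pvT matrix c x y := by
  unfold pvT pvM
  by_cases h : 0 ≤ x ∧ x < (matrix.length : Int) ∧ 0 ≤ y ∧ y < (c : Int)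
  · obtain ⟨h1, h2, h3, h4⟩ := h
    rw [if_pos ⟨h1, h2, h3, h4, hP⟩, if_pos ⟨h1, h2, h3, h4⟩]
    rw [PySem.List.pyGetD_of_nonneg _ _ h1, PySem.List.pyGetD_of_nonneg _ _ h3]
  · rw [if_neg (by tauto), if_neg h]

theorem pv_ite_add (G : Prop) [Decidable G] (a v : Int) :
    (if G then a + v else a) = a + (if G then v else 0) := by
  split_ifs <;> simp

theorem pv_range3 (k : Int) : PySem.List.pyRange (k - 1) (k + 2) 1 = [k - 1, k, k + 1] := by
  rw [PySem.List.pyRange_one_cons (by omega)]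
  rw [show k - 1 + 1 = k by ring]
  rw [PySem.List.pyRange_one_cons (by omega)]
  rw [PySem.List.pyRange_one_cons (by omega)]
  rw [PySem.List.pyRange_one_eq_nil (by omega)]

-- A's cell as the eight guarded terms
theorem pv_cellA (matrix : List (List Int)) (c : Nat) (i j : Int) :
    (PySem.List.pyRange (i - 1) (i + 2) 1).foldl (fun acc x =>
        (PySem.List.pyRange (j - 1) (j + 2) 1).foldl (fun acc2 y =>
          if 0 ≤ x ∧ x < (matrix.length : Int) ∧ 0 ≤ y ∧ y < (c : Int) ∧ ¬(x = i ∧ y = j)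
          then acc2 + PySem.List.pyGetD (PySem.List.pyGetD matrix x []) y 0
          else acc2) acc) 0
      = pvT matrix c (i-1) (j-1) + pvT matrix c (i-1) j + pvT matrix c (i-1) (j+1)
        + pvT matrix c i (j-1) + pvT matrix c i (j+1) + pvT matrix c (i+1) (j-1)
        + pvT matrix c (i+1) j + pvT matrix c (i+1) (j+1) := by
  rw [pv_range3 i, pv_range3 j]
  simp only [List.foldl_cons, List.foldl_nil]
  simp only [pv_ite_add]
  rw [pv_termA matrix c (i - 1) (j - 1) _ (by omega), pv_termA matrix c (i - 1) j _ (by omega),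
      pv_termA matrix c (i - 1) (j + 1) _ (by omega), pv_termA matrix c i (j - 1) _ (by omega),
      pv_termA matrix c i (j + 1) _ (by omega), pv_termA matrix c (i + 1) (j - 1) _ (by omega),
      pv_termA matrix c (i + 1) j _ (by omega), pv_termA matrix c (i + 1) (j + 1) _ (by omega)]
  rw [if_neg (by simp)]
  ring

-- ===== VERDICT (by name: the statement is the Claim_ definition above) =====
theorem generate_neighbor_sum_matrix_spec : Claim_equal_generate_neighbor_sum_matrix := by
  intro matrix _ hpre
  obtain ⟨hne, -⟩ := hpre
  have hL : 1 ≤ matrix.length := by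
    cases matrix with
    | nil => exact absurd rfl hne
    | cons a l => simp
  unfold Spec_generate_neighbor_sum_matrix
  unfold generate_neighbor_sum_matrix generate_neighbor_sum_matrix_alt
  set c := ((PySem.List.pyGet? matrix 0).getD []).length with hc
  simp only [pv_P matrix c matrix.length]
  simp only [PySem.List.foldl_append_singleton_eq_map, List.nil_append]
  simp only [PySem.List.pyRange_zero_nat, List.map_map]
  apply List.map_congr_left
  intro i hi
  have hi' : i < matrix.length := List.mem_range.mp hi
  apply List.map_congr_left
  intro j hj
  have hj' : j < c := List.mem_range.mp hj
  simp only [Function.comp]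
  rw [pv_cellA matrix c (↑i) (↑j)]
  rw [pv_getD_map_range _ _ _ _ (by omega), pv_getD_map_range _ _ _ _ (by omega)]
  simp only [pvProw]
  rw [pv_getD_map_range _ _ _ _ (by omega), pv_getD_map_range _ _ _ _ (by omega),
      pv_getD_map_range _ _ _ _ (by omega), pv_getD_map_range _ _ _ _ (by omega)]
  rw [← pv_cellB matrix c i j hi' hj']
  rfl
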